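-- pv_equiv track=rewrite | github.com/el-f/CS-Material-And-Snippets | Artificial Intelligence/meeting_point.py | converge_v2
-- ===== SOURCE A (Python) =====
-- from heapq import heappush, heappop
--
-- def converge_v2(g, coins):
--     coins = set(coins)
--     if len(coins) <= 1: return 0
--     # keeps track of which coins has reached each vertex in an even or odd number of steps
--     reached = {vertex: {0: 0, 1: 0} for vertex in g}
--     heap = []
--     p = 1
--     for coin in coins:
--         reached[coin][0] = p
--         heappush(heap, (0, coin))
--         p <<= 1
--     p -= 1
--
--     while heap:
--         step, vertex = heappop(heap)
--         parity = step % 2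
--         reached_coins = reached[vertex][parity]
--         for v in g[vertex]:
--             if reached[v][1 - parity] | reached_coins != reached[v][1 - parity]:
--                 reached[v][1 - parity] |= reached_coins
--                 if reached[v][1 - parity] == p: return step + 1
--                 heappush(heap, (step + 1, v))
-- ===== SOURCE B (Python) =====
-- def converge_v2(g, coins):
--     # Synchronous round-based fixpoint iteration (no priority queue):
--     # masks of coins that can reach each vertex in an even/odd number of steps,
--     # advanced one global round at a time until some vertex holds every coin
--     # (return the round number) or the masks stop changing (return None).
--     cs = set(coins)
--     if len(cs) <= 1:
--         return 0
--     full = (1 << len(cs)) - 1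
--     even = {v: 0 for v in g}
--     odd = {v: 0 for v in g}
--     b = 1
--     for c in cs:
--         even[c] |= b
--         b <<= 1
--     s = 0
--     while True:
--         s += 1
--         new_even = dict(even)
--         new_odd = dict(odd)
--         for u in g:
--             for v in g[u]:
--                 new_odd[v] |= even[u]
--                 new_even[v] |= odd[u]
--         if any(new_even[v] == full or new_odd[v] == full for v in g):
--             return s
--         if new_even == even and new_odd == odd:
--             return None
--         even, odd = new_even, new_odd
-- ===== Notes on version B (the rewrite author's own statement) =====
-- stated objective: alternative
-- what changed: A's event-driven priority-queue (heapq) propagation of coin bitmasks is replaced by a synchronous round-based fixpoint iteration: each round merges every vertex's even/odd reach-sets into its neighbours simultaneously, returning the first round in which some vertex holds all coins and None when the masks reach a fixpoint.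
-- outside the precondition, e.g. on converge_v2({1: [1, 4, 8], 7: [], 6: [], 0: [], 5: []}, [5, 7]): A returns None, B raises KeyError
import Mathlib
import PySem

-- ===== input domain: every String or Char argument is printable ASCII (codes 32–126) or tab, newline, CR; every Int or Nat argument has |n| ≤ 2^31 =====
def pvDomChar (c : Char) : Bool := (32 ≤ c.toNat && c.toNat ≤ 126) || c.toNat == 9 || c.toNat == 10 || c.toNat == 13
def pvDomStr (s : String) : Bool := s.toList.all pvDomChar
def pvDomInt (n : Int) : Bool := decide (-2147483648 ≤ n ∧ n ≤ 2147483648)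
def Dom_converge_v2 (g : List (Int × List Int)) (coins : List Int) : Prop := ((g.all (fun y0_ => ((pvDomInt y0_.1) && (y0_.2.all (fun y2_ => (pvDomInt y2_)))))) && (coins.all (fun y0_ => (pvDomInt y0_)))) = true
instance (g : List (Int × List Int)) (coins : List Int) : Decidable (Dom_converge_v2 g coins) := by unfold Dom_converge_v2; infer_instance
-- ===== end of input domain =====

-- B replaces A's priority-queue/bitmask event propagation by a synchronous round-based
-- fixpoint iteration over the whole graph (objective: alternative; the two agree on all
-- well-formed inputs, proved below).

-- ===== PORT A =====
-- Transliteration of A. Python dicts keyed by the graph's vertices (`reached`, `g`) are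
-- ported as a PySem.Dict for `g` and a total map for `reached` (its inner {0:…,1:…} dict
-- becomes a pair); the KeyError inputs are excluded by Pre_converge_v2. The heapq heap is
-- ported as an ordered-insert list (pop = head = minimum, exactly heapq's observable
-- behaviour on Int×Int entries). Coin bitmasks are nonnegative Python ints, kept as Nat.
-- The while-loop gets a fuel parameter large enough (proved) for every input in Pre_.
def pvLe (a b : Int × Int) : Bool := a.1 < b.1 || (a.1 == b.1 && a.2 ≤ b.2)

def pvPush (h : List (Int × Int)) (e : Int × Int) : List (Int × Int) :=
  match h with
  | [] => [e]
  | x :: t => if pvLe e x then e :: x :: t else x :: pvPush t e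

-- the body of A's `for v in g[vertex]` loop (early return = .inr)
def pvRelax (full : Nat) (step parity : Int) (rc : Nat) :
    List Int → (Int → Nat × Nat) → List (Int × Int) → ((Int → Nat × Nat) × List (Int × Int)) ⊕ Int
  | [], r, h => .inl (r, h)
  | v :: vs, r, h =>
    let cur := if parity == 0 then (r v).2 else (r v).1
    if cur ||| rc ≠ cur then
      let nv := cur ||| rc
      if nv = full then .inr (step + 1)
      else pvRelax full step parity rc vs
        (fun w => if w = v then (if parity == 0 then ((r v).1, nv) else (nv, (r v).2)) else r w)
        (pvPush h (step + 1, v))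
    else pvRelax full step parity rc vs r h

-- A's `while heap:` loop
def pvLoopA (d : PySem.Dict Int (List Int)) (full : Nat) :
    Nat → (Int → Nat × Nat) → List (Int × Int) → Option Int
  | _, _, [] => none
  | 0, _, _ :: _ => none
  | f + 1, r, (step, vertex) :: rest =>
    let parity := PySem.Int.mod step 2
    let rc := if parity == 0 then (r vertex).1 else (r vertex).2
    match pvRelax full step parity rc (d.getD vertex []) r rest with
    | .inr ans => some ans
    | .inl st => pvLoopA d full f st.1 st.2

def converge_v2 (g : List (Int × List Int)) (coins : List Int) : Option Int :=
  let cs := PySem.Set.ofList coins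
  if cs.length ≤ 1 then some 0
  else
    let d := PySem.Dict.ofList g
    let st := cs.foldl
      (fun (st : (Int → Nat × Nat) × List (Int × Int) × Nat) c =>
        (fun w => if w = c then (st.2.2, (st.1 w).2) else st.1 w,
         pvPush st.2.1 ((0 : Int), c), st.2.2 <<< 1))
      (fun _ => (0, 0), [], 1)
    let full := st.2.2 - 1
    pvLoopA d full (cs.length + 4 * d.keys.length * full + 1) st.1 st.2.1

-- ===== PORT B =====
-- Transliteration of B (Source B): per-vertex even/odd coin-mask dicts become total maps
-- (KeyError inputs excluded by Pre_converge_v2), dict equality is compared on the keys.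
def pvMergeN (m : Nat) (f : Int → Nat) (v : Int) : Int → Nat :=
  fun w => if w = v then f w ||| m else f w

-- one synchronous round: `for u in g: for v in g[u]: new_odd[v] |= even[u]; new_even[v] |= odd[u]`
def pvRoundB (d : PySem.Dict Int (List Int)) (K : List Int) (E O : Int → Nat) :
    (Int → Nat) × (Int → Nat) :=
  K.foldl (fun st u =>
    (d.getD u []).foldl (fun st2 v => (pvMergeN (O u) st2.1 v, pvMergeN (E u) st2.2 v)) st) (E, O)

-- B's `while True:` loop (fuel proved sufficient on Pre_)
def pvLoopB (d : PySem.Dict Int (List Int)) (K : List Int) (full : Nat) :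
    Nat → (Int → Nat) → (Int → Nat) → Int → Option Int
  | 0, _, _, _ => none
  | f + 1, E, O, s =>
    let n := pvRoundB d K E O
    if K.any (fun v => n.1 v == full || n.2 v == full) then some s
    else if K.all (fun v => n.1 v == E v && n.2 v == O v) then none
    else pvLoopB d K full f n.1 n.2 (s + 1)

def converge_v2_alt (g : List (Int × List Int)) (coins : List Int) : Option Int :=
  let cs := PySem.Set.ofList coins
  if cs.length ≤ 1 then some 0
  else
    let full := (1 <<< cs.length) - 1
    let d := PySem.Dict.ofList g
    let E := (cs.foldl
      (fun (st : (Int → Nat) × Nat) c =>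
        (fun w => if w = c then st.1 w ||| st.2 else st.1 w, st.2 <<< 1))
      (fun _ => 0, 1)).1
    pvLoopB d d.keys full (4 * d.keys.length * full + 2) E (fun _ => 0) 1

-- ===== PRECONDITION & SPEC =====
-- Pre_ excludes ill-formed graphs: when there are at least two distinct coins, every coin
-- and every listed edge target must be a declared vertex (a dict key of g). On such inputs
-- Python A raises KeyError whenever its search touches the missing vertex, and may return a
-- value only when the dangling edge happens to be unreachable from the coins; B raises
-- KeyError there in its first round.
def Pre_converge_v2 (g : List (Int × List Int)) (coins : List Int) : Prop :=
  2 ≤ (PySem.Set.ofList coins).length →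
    ((∀ c ∈ coins, c ∈ g.map Prod.fst) ∧ (∀ p ∈ g, ∀ v ∈ p.2, v ∈ g.map Prod.fst))
instance (g : List (Int × List Int)) (coins : List Int) : Decidable (Pre_converge_v2 g coins) := by
  unfold Pre_converge_v2; infer_instance

def pvWitness_converge_v2 : (List (Int × List Int)) × List Int :=
  ([(0, [1, 2]), (1, [0, 2]), (2, [0, 1])], [0, 1])

def Spec_converge_v2 (g : List (Int × List Int)) (coins : List Int) (out : Option Int) : Prop := out = converge_v2_alt g coins
instance (g : List (Int × List Int)) (coins : List Int) (out : Option Int) : Decidable (Spec_converge_v2 g coins out) := by unfold Spec_converge_v2; infer_instance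

-- ===== CLAIM (what is proved, stated in full; the proofs are below) =====
def Claim_equal_converge_v2 : Prop := ∀ (g : List (Int × List Int)) (coins : List Int), Dom_converge_v2 g coins → Pre_converge_v2 g coins → Spec_converge_v2 g coins (converge_v2 g coins)

-- ===== LEMMAS AND PROOFS =====

-- ---- the submask preorder on Nat bitmasks ----
def pvSub (a b : Nat) : Prop := a ||| b = b

lemma pvSub_refl (a : Nat) : pvSub a a := Nat.or_self a
lemma pvSub_zero (a : Nat) : pvSub 0 a := Nat.zero_or a
lemma pvSub_trans {a b c : Nat} (h1 : pvSub a b) (h2 : pvSub b c) : pvSub a c := by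
  unfold pvSub at *; rw [← h2, ← Nat.or_assoc, h1]
lemma pvSub_left (a b : Nat) : pvSub a (a ||| b) := by
  unfold pvSub; rw [← Nat.or_assoc, Nat.or_self]
lemma pvSub_right (a b : Nat) : pvSub b (a ||| b) := by
  unfold pvSub; rw [Nat.or_comm a b, ← Nat.or_assoc, Nat.or_self]
lemma pvSub_lor {a b c : Nat} (h1 : pvSub a c) (h2 : pvSub b c) : pvSub (a ||| b) c := by
  unfold pvSub at *; rw [Nat.or_assoc, h2, h1]
lemma pvSub_antisymm {a b : Nat} (h1 : pvSub a b) (h2 : pvSub b a) : a = b := by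
  unfold pvSub at *; rw [← h2, Nat.or_comm, h1]
lemma pvSub_le {a b : Nat} (h : pvSub a b) : a ≤ b := by
  unfold pvSub at h; rw [← h]; exact Nat.left_le_or
lemma pvSub_lt {a b : Nat} (h : pvSub a b) (hne : a ≠ b) : a < b :=
  Nat.lt_of_le_of_ne (pvSub_le h) hne

-- ---- single bits vs the full mask ----
lemma pvBit_sub_full {i k : Nat} (h : i < k) : pvSub (2 ^ i) (2 ^ k - 1) := by
  unfold pvSub
  apply Nat.eq_of_testBit_eq
  intro j
  simp [Nat.testBit_two_pow, Nat.testBit_two_pow_sub_one]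
  omega
lemma pvBit_ne_full {i k : Nat} (hk : 2 ≤ k) : (2 : Nat) ^ i ≠ 2 ^ k - 1 := by
  intro h
  rcases Nat.eq_zero_or_pos i with hi | hi
  · subst hi
    have : (2:Nat) ^ 2 ≤ 2 ^ k := Nat.pow_le_pow_right (by norm_num) hk
    simp at h; omega
  · have h0 : Nat.testBit (2 ^ i) 0 = false := by
      simp; omega
    have h1 : Nat.testBit (2 ^ k - 1) 0 = true := by
      simp; omega
    rw [h] at h0; rw [h0] at h1; exact Bool.noConfusion h1
lemma pvZero_ne_full {k : Nat} (hk : 2 ≤ k) : (0 : Nat) ≠ 2 ^ k - 1 := by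
  have : (2:Nat) ^ 2 ≤ 2 ^ k := Nat.pow_le_pow_right (by norm_num) hk
  omega

-- ---- pvMergeAll: the accumulated effect of merging one mask into a target list ----
def pvMergeAll (m : Nat) (W : Int → Nat) (ns : List Int) : Int → Nat :=
  ns.foldl (fun a v => pvMergeN m a v) W

lemma pvMergeAll_val (m : Nat) (W : Int → Nat) (ns : List Int) (v : Int) :
    pvMergeAll m W ns v = if v ∈ ns then W v ||| m else W v := by
  induction ns generalizing W with
  | nil => simp [pvMergeAll]
  | cons x xs ih =>
    show pvMergeAll m (pvMergeN m W x) xs v = _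
    rw [ih]
    by_cases hvx : v = x
    · subst hvx
      by_cases hv : v ∈ xs <;> simp [pvMergeN, hv]
    · simp [pvMergeN, List.mem_cons, hvx]

-- ---- pvStep1: one synchronous half-round (merge src-layer into dst-layer) ----
def pvStep1 (d : PySem.Dict Int (List Int)) (K : List Int) (src dst : Int → Nat) : Int → Nat :=
  K.foldl (fun acc u => pvMergeAll (src u) acc (d.getD u [])) dst

lemma pvStep1_lower (d : PySem.Dict Int (List Int)) (K : List Int) (src dst : Int → Nat) (v : Int) :
    pvSub (dst v) (pvStep1 d K src dst v) := by
  induction K generalizing dst with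
  | nil => exact pvSub_refl _
  | cons u us ih =>
    show pvSub (dst v) (pvStep1 d us src (pvMergeAll (src u) dst (d.getD u [])) v)
    refine pvSub_trans ?_ (ih _)
    rw [pvMergeAll_val]
    split
    · exact pvSub_left _ _
    · exact pvSub_refl _

lemma pvStep1_edge (d : PySem.Dict Int (List Int)) (K : List Int) (src dst : Int → Nat)
    {u v : Int} (hu : u ∈ K) (hv : v ∈ d.getD u []) :
    pvSub (src u) (pvStep1 d K src dst v) := by
  induction K generalizing dst with
  | nil => cases hu
  | cons x xs ih =>
    show pvSub (src u) (pvStep1 d xs src (pvMergeAll (src x) dst (d.getD x [])) v)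
    rcases List.mem_cons.mp hu with h | h
    · subst h
      refine pvSub_trans ?_ (pvStep1_lower d xs src _ v)
      rw [pvMergeAll_val]; simp [hv]
      exact pvSub_right _ _
    · exact ih _ h

lemma pvStep1_upper (d : PySem.Dict Int (List Int)) (K : List Int) (src dst : Int → Nat)
    (m : Int → Nat) (h1 : ∀ w, pvSub (dst w) (m w))
    (h2 : ∀ u ∈ K, ∀ w ∈ d.getD u [], pvSub (src u) (m w)) (v : Int) :
    pvSub (pvStep1 d K src dst v) (m v) := by
  induction K generalizing dst with
  | nil => exact h1 v
  | cons x xs ih =>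
    show pvSub (pvStep1 d xs src (pvMergeAll (src x) dst (d.getD x [])) v) (m v)
    refine ih _ ?_ ?_
    · intro w
      rw [pvMergeAll_val]
      split
      · rename_i hw
        exact pvSub_lor (h1 w) (h2 x (by simp) w hw)
      · exact h1 w
    · intro u hu w hw
      exact h2 u (List.mem_cons_of_mem _ hu) w hw

lemma pvStep1_stale (d : PySem.Dict Int (List Int)) (K : List Int) (src dst : Int → Nat)
    (h : ∀ u ∈ K, ∀ w ∈ d.getD u [], pvSub (src u) (dst w)) :
    pvStep1 d K src dst = dst := by
  funext v
  exact pvSub_antisymm (pvStep1_upper d K src dst dst (fun w => pvSub_refl _) h v)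
    (pvStep1_lower d K src dst v)

lemma pvRoundB_eq (d : PySem.Dict Int (List Int)) (K : List Int) (E O : Int → Nat) :
    pvRoundB d K E O = (pvStep1 d K O E, pvStep1 d K E O) := by
  have inner : ∀ (u : Int) (st : (Int → Nat) × (Int → Nat)),
      (d.getD u []).foldl (fun st2 v => (pvMergeN (O u) st2.1 v, pvMergeN (E u) st2.2 v)) st
        = (pvMergeAll (O u) st.1 (d.getD u []), pvMergeAll (E u) st.2 (d.getD u [])) := by
    intro u st
    rw [← Prod.mk.eta (p := st), PySem.List.foldl_prod_mk]
    rfl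
  unfold pvRoundB
  simp only [inner]
  rw [PySem.List.foldl_prod_mk (f := fun a u => pvMergeAll (O u) a (d.getD u [])) (g := fun a u => pvMergeAll (E u) a (d.getD u []))]
  rfl

-- ---- heap shape lemmas ----
def pvBlock (t : Int) (S : List Int) : List (Int × Int) := S.map (fun v => (t, v))

lemma pvPush_append (h1 h2 : List (Int × Int)) (e : Int × Int)
    (hh : ∀ x ∈ h1, pvLe e x = false) : pvPush (h1 ++ h2) e = h1 ++ pvPush h2 e := by
  induction h1 with
  | nil => rfl
  | cons x t ih =>
    rw [List.cons_append, pvPush, hh x (by simp)]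
    simp only [Bool.false_eq_true, if_false, List.cons_append]
    rw [ih (fun y hy => hh y (by simp [hy]))]

lemma pvPush_block (t : Int) (S : List Int) (v : Int) :
    ∃ S', pvPush (pvBlock t S) (t, v) = pvBlock t S' ∧ S'.Perm (v :: S) := by
  induction S with
  | nil => exact ⟨[v], rfl, List.Perm.refl _⟩
  | cons x xs ih =>
    show ∃ S', pvPush ((t, x) :: pvBlock t xs) (t, v) = _ ∧ _
    rw [pvPush]
    split
    · exact ⟨v :: x :: xs, rfl, List.Perm.refl _⟩
    · obtain ⟨S', hS', hp⟩ := ih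
      refine ⟨x :: S', ?_, ?_⟩
      · simp [pvBlock] at hS' ⊢; exact hS'
      · exact (hp.cons x).trans (List.Perm.swap v x xs)

lemma pvLe_succ_false (s : Int) (v w : Int) : pvLe (s + 1, v) (s, w) = false := by
  simp only [pvLe, Bool.or_eq_false_iff, Bool.and_eq_false_iff, decide_eq_false_iff_not, beq_eq_false_iff_ne]
  refine ⟨by omega, Or.inl (by omega)⟩

lemma pvPush_blocks (s : Int) (Ls Ln : List Int) (v : Int) :
    ∃ Ln', pvPush (pvBlock s Ls ++ pvBlock (s + 1) Ln) (s + 1, v)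
      = pvBlock s Ls ++ pvBlock (s + 1) Ln' ∧ Ln'.Perm (v :: Ln) := by
  obtain ⟨Ln', h, hp⟩ := pvPush_block (s + 1) Ln v
  refine ⟨Ln', ?_, hp⟩
  rw [pvPush_append _ _ _ ?_, h]
  intro x hx
  simp [pvBlock] at hx
  obtain ⟨y, _, hy⟩ := hx
  rw [← hy]
  exact pvLe_succ_false s v y

-- ---- capacity (termination measure) ----
def pvCap (K : List Int) (full : Nat) (f : Int → Nat) : Nat :=
  (K.map (fun v => full - f v)).sum

lemma pvCap_le (K : List Int) (full : Nat) (f : Int → Nat) :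
    pvCap K full f ≤ K.length * full := by
  induction K with
  | nil => simp [pvCap]
  | cons x xs ih =>
    simp only [pvCap, List.map_cons, List.sum_cons, List.length_cons]
    have : full - f x ≤ full := Nat.sub_le _ _
    calc full - f x + (xs.map (fun v => full - f v)).sum
        ≤ full + xs.length * full := Nat.add_le_add this ih
      _ = (xs.length + 1) * full := by ring

lemma pvCap_mono (K : List Int) (full : Nat) (f g : Int → Nat)
    (h : ∀ v ∈ K, f v ≤ g v) : pvCap K full g ≤ pvCap K full f := by
  induction K with
  | nil => simp [pvCap]
  | cons x xs ih =>
    simp only [pvCap, List.map_cons, List.sum_cons] at *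
    exact Nat.add_le_add (Nat.sub_le_sub_left (h x (by simp)) full)
      (ih (fun v hv => h v (by simp [hv])))

lemma pvCap_strict (K : List Int) (full : Nat) (f g : Int → Nat)
    (h : ∀ v ∈ K, f v ≤ g v) {v : Int} (hv : v ∈ K) (hs : f v < g v) (hb : g v ≤ full) :
    pvCap K full g + 1 ≤ pvCap K full f := by
  induction K with
  | nil => cases hv
  | cons x xs ih =>
    simp only [pvCap, List.map_cons, List.sum_cons] at *
    rcases List.mem_cons.mp hv with hx | hx
    · subst hx
      have h1 : full - g v + 1 ≤ full - f v := by omega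
      have h2 : pvCap xs full g ≤ pvCap xs full f :=
        pvCap_mono xs full f g (fun w hw => h w (by simp [hw]))
      unfold pvCap at h2
      omega
    · have h1 : full - g x ≤ full - f x := Nat.sub_le_sub_left (h x (by simp)) full
      have h2 := ih (fun w hw => h w (by simp [hw])) hx
      omega

-- ---- the reached-map viewed as a (read-layer, write-layer) pair ----
def pvMk (p : Int) (R W : Int → Nat) : Int → Nat × Nat :=
  fun v => if p == 0 then (R v, W v) else (W v, R v)

def pvPar (s : Nat) : Int := ((s % 2 : Nat) : Int)

lemma pvPar_mod (s : Nat) : PySem.Int.mod ((s : Nat) : Int) 2 = pvPar s := by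
  unfold pvPar
  rw [show ((2 : Int)) = ((2 : Nat) : Int) by norm_num, PySem.Int.mod_natCast]

lemma pvMk_read1 (p : Int) (R W : Int → Nat) (v : Int) :
    (if p == 0 then (pvMk p R W v).1 else (pvMk p R W v).2) = R v := by
  by_cases h : p == 0 <;> simp [pvMk, h]

lemma pvMk_read2 (p : Int) (R W : Int → Nat) (v : Int) :
    (if p == 0 then (pvMk p R W v).2 else (pvMk p R W v).1) = W v := by
  by_cases h : p == 0 <;> simp [pvMk, h]

lemma pvMk_update (p : Int) (R W : Int → Nat) (v : Int) (nv : Nat) :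
    (fun w => if w = v then (if p == 0 then ((pvMk p R W v).1, nv) else (nv, (pvMk p R W v).2))
              else pvMk p R W w)
    = pvMk p R (fun w => if w = v then nv else W w) := by
  funext w
  by_cases h : p == 0 <;> by_cases hw : w = v <;> simp [pvMk, h, hw]

lemma pvMk_flip (s : Nat) (R W : Int → Nat) :
    pvMk (pvPar (s + 1)) W R = pvMk (pvPar s) R W := by
  funext v
  rcases Nat.even_or_odd s with h | h
  · have h1 : s % 2 = 0 := Nat.even_iff.mp h
    have h2 : (s + 1) % 2 = 1 := by omega
    simp [pvMk, pvPar, h1, h2]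
  · have h1 : s % 2 = 1 := Nat.odd_iff.mp h
    have h2 : (s + 1) % 2 = 0 := by omega
    simp [pvMk, pvPar, h1, h2]

-- ---- characterisation of one relax pass (A's inner for-loop) ----
lemma pvRelax_spec (full : Nat) (s : Nat) (p : Int) (rc : Nat) (K : List Int)
    (R : Int → Nat) :
    ∀ (ns : List Int) (W : Int → Nat) (Ln : List Int) (Ls : List Int),
    (∀ v ∈ ns, v ∈ K) →
    pvSub rc full → (∀ v, pvSub (W v) full) → (∀ v ∈ ns, W v ≠ full) →
    (((∃ v ∈ ns, W v ||| rc = full) →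
        pvRelax full (s : Int) p rc ns (pvMk p R W) (pvBlock (s : Int) Ls ++ pvBlock ((s : Int) + 1) Ln)
          = .inr ((s : Int) + 1))
     ∧ ((¬ ∃ v ∈ ns, W v ||| rc = full) → ∃ Ln',
        pvRelax full (s : Int) p rc ns (pvMk p R W) (pvBlock (s : Int) Ls ++ pvBlock ((s : Int) + 1) Ln)
          = .inl (pvMk p R (pvMergeAll rc W ns), pvBlock (s : Int) Ls ++ pvBlock ((s : Int) + 1) Ln')
        ∧ (∀ v ∈ Ln, v ∈ Ln')
        ∧ (∀ v ∈ Ln', v ∈ Ln ∨ v ∈ ns)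
        ∧ (∀ v ∈ Ln', v ∈ Ln ∨ pvMergeAll rc W ns v ≠ W v)
        ∧ (∀ v, pvMergeAll rc W ns v ≠ W v → v ∈ Ln')
        ∧ Ln'.length + 2 * pvCap K full (pvMergeAll rc W ns) ≤ Ln.length + 2 * pvCap K full W)) := by
  intro ns
  induction ns with
  | nil =>
    intro W Ln Ls _ _ _ _
    constructor
    · rintro ⟨v, hv, -⟩; cases hv
    · intro _
      exact ⟨Ln, rfl, fun v hv => hv, fun v hv => Or.inl hv, fun v hv => Or.inl hv,
        fun v hv => absurd rfl hv, le_refl _⟩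
  | cons v vs ih =>
    intro W Ln Ls hns hrc hWb hWnf
    have hvK : v ∈ K := hns v (by simp)
    by_cases hg : W v ||| rc ≠ W v
    · -- growth at v
      by_cases hf : W v ||| rc = full
      · -- immediate return
        have hrun : pvRelax full (s : Int) p rc (v :: vs) (pvMk p R W)
            (pvBlock (s : Int) Ls ++ pvBlock ((s : Int) + 1) Ln) = .inr ((s : Int) + 1) := by
          simp only [pvRelax, pvMk_read2]
          rw [if_pos hg, if_pos hf]
        constructor
        · intro _; exact hrun
        · intro hne; exact absurd ⟨v, by simp, hf⟩ hne
      · -- growth, not full: push and recurse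
        set W' : Int → Nat := fun w => if w = v then W v ||| rc else W w with hW'
        have hMN : pvMergeN rc W v = W' := by
          funext w; by_cases hw : w = v <;> simp [pvMergeN, hw, hW']
        have hMA : pvMergeAll rc W (v :: vs) = pvMergeAll rc W' vs := by
          show pvMergeAll rc (pvMergeN rc W v) vs = _
          rw [hMN]
        have hW'v : ∀ x, W' x ||| rc = W x ||| rc := by
          intro x
          by_cases hx : x = v
          · simp [hW', hx, Nat.or_assoc]
          · simp [hW', hx]
        have hcond : (∃ x ∈ vs, W' x ||| rc = full) ↔ (∃ x ∈ vs, W x ||| rc = full) := by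
          constructor
          · rintro ⟨x, hx, hfx⟩; exact ⟨x, hx, (hW'v x) ▸ hfx⟩
          · rintro ⟨x, hx, hfx⟩; exact ⟨x, hx, (hW'v x).symm ▸ hfx⟩
        obtain ⟨Ln2, hpush, hLn2⟩ := pvPush_blocks (s : Int) Ls Ln v
        have hrun : ∀ (res : ((Int → Nat × Nat) × List (Int × Int)) ⊕ Int),
            pvRelax full (s : Int) p rc vs (pvMk p R W')
              (pvBlock (s : Int) Ls ++ pvBlock ((s : Int) + 1) Ln2) = res →
            pvRelax full (s : Int) p rc (v :: vs) (pvMk p R W)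
              (pvBlock (s : Int) Ls ++ pvBlock ((s : Int) + 1) Ln) = res := by
          intro res hres
          simp only [pvRelax, pvMk_read2]
          rw [if_pos hg, if_neg hf, pvMk_update, hpush]
          exact hres
        have hWb' : ∀ x, pvSub (W' x) full := by
          intro x
          by_cases hx : x = v
          · simp only [hW', hx, if_pos rfl]; exact pvSub_lor (hWb v) hrc
          · simpa [hW', hx] using hWb x
        have hWnf' : ∀ x ∈ vs, W' x ≠ full := by
          intro x hx
          by_cases hxv : x = v
          · simp only [hW', hxv, if_pos rfl]; exact hf
          · simpa [hW', hxv] using hWnf x (by simp [hx])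
        obtain ⟨IH1, IH2⟩ := ih W' Ln2 Ls (fun x hx => hns x (by simp [hx])) hrc hWb' hWnf'
        constructor
        · rintro ⟨x, hx, hfx⟩
          rcases List.mem_cons.mp hx with hxv | hxv
          · exact absurd (hxv ▸ hfx) hf
          · exact hrun _ (IH1 ⟨x, hxv, (hW'v x).symm ▸ hfx⟩)
        · intro hne
          have hne' : ¬ ∃ x ∈ vs, W' x ||| rc = full := by
            intro h
            exact hne (by
              obtain ⟨x, hx, hfx⟩ := hcond.mp h
              exact ⟨x, by simp [hx], hfx⟩)
          obtain ⟨Ln3, heq, hsub, hmem, hgrow, hcover, hlen⟩ := IH2 hne'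
          refine ⟨Ln3, ?_, ?_, ?_, ?_, ?_, ?_⟩
          · rw [hMA]; exact hrun _ heq
          · intro x hx
            exact hsub x (hLn2.mem_iff.mpr (by simp [hx]))
          · intro x hx
            rcases hmem x hx with h | h
            · rcases List.mem_cons.mp (hLn2.subset h) with h' | h'
              · exact Or.inr (by simp [h'])
              · exact Or.inl h'
            · exact Or.inr (by simp [h])
          · intro x hx
            rw [hMA]
            have hlow : pvSub (W' x) (pvMergeAll rc W' vs x) := by
              rw [pvMergeAll_val]; split
              · exact pvSub_left _ _
              · exact pvSub_refl _
            by_cases hxv : x = v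
            · subst hxv
              refine Or.inr ?_
              intro hcontra
              apply hg
              have h1 : pvSub (W x ||| rc) (W x) := by
                have := hcontra ▸ hlow
                simpa [hW'] using this
              exact pvSub_antisymm h1 (pvSub_left _ _)
            · rcases hgrow x hx with h | h
              · rcases List.mem_cons.mp (hLn2.subset h) with h' | h'
                · exact absurd h' hxv
                · exact Or.inl h'
              · refine Or.inr ?_
                intro hc
                apply h
                rw [hc]
                simp [hW', hxv]
          · intro x hx
            rw [hMA] at hx
            by_cases hxv : x = v
            · subst hxv
              exact hsub x (hLn2.mem_iff.mpr (by simp))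
            · apply hcover
              intro hc
              apply hx
              rw [hc]
              simp [hW', hxv]
          · have hlenLn2 : Ln2.length = Ln.length + 1 := by
              rw [hLn2.length_eq]; simp
            have hcapW' : pvCap K full W' + 1 ≤ pvCap K full W := by
              refine pvCap_strict K full W W' ?_ hvK ?_ ?_
              · intro x hx
                by_cases hxv : x = v
                · subst hxv; simp only [hW', if_pos rfl]; exact pvSub_le (pvSub_left _ _)
                · simp [hW', hxv]
              · simp only [hW', if_pos rfl]
                exact pvSub_lt (pvSub_left _ _) (Ne.symm hg)
              · simp only [hW', if_pos rfl]
                exact pvSub_le (pvSub_lor (hWb v) hrc)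
            rw [hMA]
            omega
    · -- no growth at v
      push_neg at hg
      have hMN : pvMergeN rc W v = W := by
        funext w; by_cases hw : w = v
        · subst hw; simp [pvMergeN, hg]
        · simp [pvMergeN, hw]
      have hMA : pvMergeAll rc W (v :: vs) = pvMergeAll rc W vs := by
        show pvMergeAll rc (pvMergeN rc W v) vs = _
        rw [hMN]
      have hrun : ∀ (res : ((Int → Nat × Nat) × List (Int × Int)) ⊕ Int),
          pvRelax full (s : Int) p rc vs (pvMk p R W)
            (pvBlock (s : Int) Ls ++ pvBlock ((s : Int) + 1) Ln) = res →
          pvRelax full (s : Int) p rc (v :: vs) (pvMk p R W)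
            (pvBlock (s : Int) Ls ++ pvBlock ((s : Int) + 1) Ln) = res := by
        intro res hres
        simp only [pvRelax, pvMk_read2]
        rw [if_neg (by simpa using hg)]
        exact hres
      obtain ⟨IH1, IH2⟩ := ih W Ln Ls (fun x hx => hns x (by simp [hx])) hrc hWb
        (fun x hx => hWnf x (by simp [hx]))
      constructor
      · rintro ⟨x, hx, hfx⟩
        rcases List.mem_cons.mp hx with hxv | hxv
        · exact absurd (hg ▸ hxv ▸ hfx) (hWnf v (by simp))
        · exact hrun _ (IH1 ⟨x, hxv, hfx⟩)
      · intro hne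
        have hne' : ¬ ∃ x ∈ vs, W x ||| rc = full := by
          rintro ⟨x, hx, hfx⟩
          exact hne ⟨x, by simp [hx], hfx⟩
        obtain ⟨Ln3, heq, hsub, hmem, hgrow, hcover, hlen⟩ := IH2 hne'
        refine ⟨Ln3, ?_, hsub, ?_, ?_, ?_, ?_⟩
        · rw [hMA]; exact hrun _ heq
        · intro x hx
          rcases hmem x hx with h | h
          · exact Or.inl h
          · exact Or.inr (by simp [h])
        · intro x hx
          rw [hMA]
          exact hgrow x hx
        · intro x hx
          rw [hMA] at hx
          exact hcover x hx
        · rw [hMA]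
          exact hlen

-- ---- processing one whole level of the heap ----
lemma pvLoopA_cons (d : PySem.Dict Int (List Int)) (full : Nat) (f : Nat)
    (r : Int → Nat × Nat) (step vertex : Int) (rest : List (Int × Int)) :
    pvLoopA d full (f + 1) r ((step, vertex) :: rest)
      = (match pvRelax full step (PySem.Int.mod step 2)
            (if (PySem.Int.mod step 2) == 0 then (r vertex).1 else (r vertex).2)
            (d.getD vertex []) r rest with
         | .inr ans => some ans
         | .inl st => pvLoopA d full f st.1 st.2) := rfl

lemma pvMid (d : PySem.Dict Int (List Int)) (full : Nat)
    (hadj : ∀ u, ∀ v ∈ d.getD u [], v ∈ d.keys) :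
    ∀ (Ls : List Int) (fA : Nat) (s : Nat) (R W W0 : Int → Nat) (Ln : List Int),
    (∀ v ∈ Ls, v ∈ d.keys) → (∀ v ∈ Ln, v ∈ d.keys) →
    (∀ v, pvSub (R v) full) → (∀ v, pvSub (W v) full) →
    (∀ v ∈ d.keys, R v ≠ full) → (∀ v ∈ d.keys, W v ≠ full) →
    (∀ v, pvSub (W0 v) (W v)) →
    (∀ v, pvSub (W v) (pvStep1 d d.keys R W0 v)) →
    (∀ u ∈ d.keys, u ∉ Ls → ∀ v ∈ d.getD u [], pvSub (R u) (W v)) →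
    (∀ v, W v ≠ W0 v → v ∈ Ln) →
    (∀ v ∈ Ln, W v ≠ W0 v) →
    (Ls.length + Ln.length + 2 * pvCap d.keys full R + 2 * pvCap d.keys full W + 1 ≤ fA) →
    (((∃ v ∈ d.keys, pvStep1 d d.keys R W0 v = full) →
        pvLoopA d full fA (pvMk (pvPar s) R W) (pvBlock (s : Int) Ls ++ pvBlock ((s : Int) + 1) Ln)
          = some ((s : Int) + 1))
     ∧ ((¬ ∃ v ∈ d.keys, pvStep1 d d.keys R W0 v = full) → ∃ Ln' fA',
        pvLoopA d full fA (pvMk (pvPar s) R W) (pvBlock (s : Int) Ls ++ pvBlock ((s : Int) + 1) Ln)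
          = pvLoopA d full fA' (pvMk (pvPar s) R (pvStep1 d d.keys R W0)) (pvBlock ((s : Int) + 1) Ln')
        ∧ (∀ v ∈ Ln', v ∈ d.keys)
        ∧ (∀ v, pvStep1 d d.keys R W0 v ≠ W0 v → v ∈ Ln')
        ∧ (∀ v ∈ Ln', pvStep1 d d.keys R W0 v ≠ W0 v)
        ∧ Ln'.length + 2 * pvCap d.keys full R + 2 * pvCap d.keys full (pvStep1 d d.keys R W0) + 1 ≤ fA')) := by
  intro Ls
  induction Ls with
  | nil =>
    intro fA s R W W0 Ln hLs hLn hRb hWb hRnf hWnf hW0 hWG habs hLnchg hLngrow hfA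
    have hWEq : W = pvStep1 d d.keys R W0 := by
      funext v
      refine pvSub_antisymm (hWG v) ?_
      exact pvStep1_upper d d.keys R W0 W hW0 (fun u hu w hw => habs u hu (by simp) w hw) v
    constructor
    · rintro ⟨v, hvK, hfv⟩
      exact absurd (hWEq ▸ hfv) (hWnf v hvK)
    · intro _
      refine ⟨Ln, fA, ?_, hLn, ?_, ?_, ?_⟩
      · rw [← hWEq]
        simp [pvBlock]
      · intro v hv; exact hLnchg v (hWEq ▸ hv)
      · intro v hv; exact hWEq ▸ hLngrow v hv
      · rw [← hWEq]
        simpa using hfA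
  | cons u Ls' ih =>
    intro fA s R W W0 Ln hLs hLn hRb hWb hRnf hWnf hW0 hWG habs hLnchg hLngrow hfA
    have huK : u ∈ d.keys := hLs u (by simp)
    obtain ⟨f, rfl⟩ : ∃ f, fA = f + 1 := ⟨fA - 1, by omega⟩
    have hheap : pvBlock (s : Int) (u :: Ls') ++ pvBlock ((s : Int) + 1) Ln
        = ((s : Int), u) :: (pvBlock (s : Int) Ls' ++ pvBlock ((s : Int) + 1) Ln) := by
      simp [pvBlock]
    have hWnfns : ∀ v ∈ d.getD u [], W v ≠ full := fun v hv => hWnf v (hadj u v hv)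
    obtain ⟨RS1, RS2⟩ := pvRelax_spec full s (pvPar s) (R u) d.keys R (d.getD u []) W Ln Ls'
      (hadj u) (hRb u) hWb hWnfns
    have hWGb : ∀ v, pvSub (pvStep1 d d.keys R W0 v) full := by
      intro v
      exact pvStep1_upper d d.keys R W0 (fun _ => full)
        (fun w => pvSub_trans (hW0 w) (hWb w)) (fun u' _ w _ => hRb u') v
    have hloop : pvLoopA d full (f + 1) (pvMk (pvPar s) R W)
        (pvBlock (s : Int) (u :: Ls') ++ pvBlock ((s : Int) + 1) Ln)
      = (match pvRelax full (s : Int) (pvPar s) (R u) (d.getD u []) (pvMk (pvPar s) R W)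
            (pvBlock (s : Int) Ls' ++ pvBlock ((s : Int) + 1) Ln) with
         | .inr ans => some ans
         | .inl st => pvLoopA d full f st.1 st.2) := by
      rw [hheap, pvLoopA_cons, pvPar_mod, pvMk_read1]
    by_cases hC : ∃ v ∈ d.getD u [], W v ||| R u = full
    · have hF : ∃ v ∈ d.keys, pvStep1 d d.keys R W0 v = full := by
        obtain ⟨v, hv, hfv⟩ := hC
        refine ⟨v, hadj u v hv, ?_⟩
        refine pvSub_antisymm (hWGb v) ?_
        rw [← hfv]
        exact pvSub_lor (hWG v) (pvStep1_edge d d.keys R W0 huK hv)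
      have hres : pvLoopA d full (f + 1) (pvMk (pvPar s) R W)
          (pvBlock (s : Int) (u :: Ls') ++ pvBlock ((s : Int) + 1) Ln) = some ((s : Int) + 1) := by
        rw [hloop, RS1 hC]
      exact ⟨fun _ => hres, fun hnF => absurd hF hnF⟩
    · obtain ⟨Ln2, heq, hsub, hmem, hgrow, hcover, hlen⟩ := RS2 hC
      push_neg at hC
      set W' := pvMergeAll (R u) W (d.getD u []) with hW'
      have hWle : ∀ v, pvSub (W v) (W' v) := by
        intro v
        rw [hW', pvMergeAll_val]
        split
        · exact pvSub_left _ _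
        · exact pvSub_refl _
      have hW'val : ∀ v, W' v = if v ∈ d.getD u [] then W v ||| R u else W v := by
        intro v; rw [hW', pvMergeAll_val]
      obtain ⟨IH1, IH2⟩ := ih f s R W' W0 Ln2
        (fun v hv => hLs v (by simp [hv]))
        (fun v hv => by
          rcases hmem v hv with h | h
          · exact hLn v h
          · exact hadj u v h)
        hRb
        (fun v => by
          rw [hW'val]
          split
          · exact pvSub_lor (hWb v) (hRb u)
          · exact hWb v)
        hRnf
        (fun v hv => by
          rw [hW'val]
          split
          · rename_i hvns; exact hC v hvns
          · exact hWnf v hv)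
        (fun v => pvSub_trans (hW0 v) (hWle v))
        (fun v => by
          rw [hW'val]
          split
          · rename_i hvns
            exact pvSub_lor (hWG v) (pvStep1_edge d d.keys R W0 huK hvns)
          · exact hWG v)
        (fun u' hu' hnu' v hv => by
          by_cases huu : u' = u
          · subst huu
            rw [hW'val, if_pos hv]
            exact pvSub_right _ _
          · have : u' ∉ u :: Ls' := by simp [huu, hnu']
            exact pvSub_trans (habs u' hu' this v hv) (hWle v))
        (fun v hv => by
          by_cases hch : W' v = W v
          · exact hsub v (hLnchg v (hch ▸ hv))
          · exact hcover v hch)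
        (fun v hv => by
          rcases hgrow v hv with h | h
          · intro hcontra
            exact hLngrow v h (pvSub_antisymm (hcontra ▸ hWle v) (hW0 v))
          · intro hcontra
            apply h
            refine pvSub_antisymm ?_ (hWle v)
            rw [hcontra]
            exact hW0 v)
        (by
          simp only [List.length_cons] at hfA
          omega)
      constructor
      · intro hF
        rw [hloop, heq]
        exact IH1 hF
      · intro hnF
        obtain ⟨Ln', fA', hres, h1, h2, h3, h4⟩ := IH2 hnF
        refine ⟨Ln', fA', ?_, h1, h2, h3, h4⟩
        rw [hloop, heq]
        exact hres

-- ---- the level-by-level bisimulation of the two loops ----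
lemma pvLoopA_nil (d : PySem.Dict Int (List Int)) (full : Nat) (f : Nat) (r : Int → Nat × Nat) :
    pvLoopA d full f r [] = none := by
  cases f <;> rfl

lemma pvLoopB_succ (d : PySem.Dict Int (List Int)) (K : List Int) (full : Nat) (f : Nat)
    (E O : Int → Nat) (s : Int) :
    pvLoopB d K full (f + 1) E O s
      = (if K.any (fun v => (pvRoundB d K E O).1 v == full || (pvRoundB d K E O).2 v == full)
         then some s
         else if K.all (fun v => (pvRoundB d K E O).1 v == E v && (pvRoundB d K E O).2 v == O v)
         then none
         else pvLoopB d K full f (pvRoundB d K E O).1 (pvRoundB d K E O).2 (s + 1)) := rfl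

lemma pvLevel (d : PySem.Dict Int (List Int)) (full : Nat)
    (hadj : ∀ u, ∀ v ∈ d.getD u [], v ∈ d.keys) :
    ∀ (fB : Nat) (s : Nat) (R W : Int → Nat) (Ls : List Int) (fA : Nat),
    (∀ v ∈ Ls, v ∈ d.keys) →
    (∀ v, pvSub (R v) full) → (∀ v, pvSub (W v) full) →
    (∀ v ∈ d.keys, R v ≠ full) → (∀ v ∈ d.keys, W v ≠ full) →
    (∀ u ∈ d.keys, u ∉ Ls → ∀ v ∈ d.getD u [], pvSub (R u) (W v)) →
    (∀ u ∈ d.keys, ∀ v ∈ d.getD u [], pvSub (W u) (R v)) →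
    (Ls.length + 2 * pvCap d.keys full R + 2 * pvCap d.keys full W + 1 ≤ fA) →
    (pvCap d.keys full R + pvCap d.keys full W + 1 ≤ fB) →
    pvLoopA d full fA (pvMk (pvPar s) R W) (pvBlock (s : Int) Ls)
      = pvLoopB d d.keys full fB (if s % 2 = 0 then R else W) (if s % 2 = 0 then W else R) ((s : Int) + 1) := by
  intro fB
  induction fB with
  | zero =>
    intro s R W Ls fA _ _ _ _ _ _ _ _ hfB
    omega
  | succ fB' ih =>
    intro s R W Ls fA hLs hRb hWb hRnf hWnf habs hstl hfA hfB
    set WG := pvStep1 d d.keys R W with hWGdef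
    have hstale : pvStep1 d d.keys W R = R := pvStep1_stale d d.keys W R hstl
    have hWGb : ∀ v, pvSub (WG v) full := by
      intro v
      exact pvStep1_upper d d.keys R W (fun _ => full) hWb (fun u' _ w _ => hRb u') v
    have hWGlow : ∀ v, pvSub (W v) (WG v) := fun v => pvStep1_lower d d.keys R W v
    -- the A side, processed one whole level
    obtain ⟨M1, M2⟩ := pvMid d full hadj Ls fA s R W W []
      hLs (by simp) hRb hWb hRnf hWnf (fun v => pvSub_refl _) hWGlow habs
      (fun v hv => absurd rfl hv) (by simp) (by simpa using hfA)
    rw [show pvBlock (s : Int) Ls = pvBlock (s : Int) Ls ++ pvBlock ((s : Int) + 1) [] by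
      simp [pvBlock]]
    by_cases hF : ∃ v ∈ d.keys, WG v = full
    · -- some vertex becomes complete in this round
      rw [M1 hF, pvLoopB_succ, if_pos]
      rcases Nat.eq_zero_or_pos (s % 2) with hs | hs
      · rw [if_pos hs, if_pos hs, pvRoundB_eq, hstale, ← hWGdef]
        obtain ⟨v, hv, hfv⟩ := hF
        refine List.any_eq_true.mpr ⟨v, hv, ?_⟩
        simp [hfv]
      · have hs1 : ¬ s % 2 = 0 := by omega
        rw [if_neg hs1, if_neg hs1, pvRoundB_eq, hstale, ← hWGdef]
        obtain ⟨v, hv, hfv⟩ := hF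
        refine List.any_eq_true.mpr ⟨v, hv, ?_⟩
        simp [hfv]
    · obtain ⟨Ln', fA', hres, hLn'K, hchg, hgrow, hfA'⟩ := M2 hF
      rw [← hWGdef] at hres hfA'
      simp only [← hWGdef] at hchg hgrow
      push_neg at hF
      by_cases hfix : ∀ v ∈ d.keys, WG v = W v
      · -- fixpoint: both sides report failure
        have hLn'nil : Ln' = [] := by
          rw [List.eq_nil_iff_forall_not_mem]
          intro v hv
          exact hgrow v hv (hfix v (hLn'K v hv))
        rw [hres, hLn'nil]
        rw [show pvBlock ((s : Int) + 1) [] = [] from rfl, pvLoopA_nil]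
        rw [pvLoopB_succ, if_neg, if_pos]
        · rcases Nat.eq_zero_or_pos (s % 2) with hs | hs
          · rw [if_pos hs, if_pos hs, pvRoundB_eq, hstale, ← hWGdef]
            refine List.all_eq_true.mpr ?_
            intro v hv
            simp [hfix v hv]
          · have hs1 : ¬ s % 2 = 0 := by omega
            rw [if_neg hs1, if_neg hs1, pvRoundB_eq, hstale, ← hWGdef]
            refine List.all_eq_true.mpr ?_
            intro v hv
            simp [hfix v hv]
        · rcases Nat.eq_zero_or_pos (s % 2) with hs | hs
          · rw [if_pos hs, if_pos hs, pvRoundB_eq, hstale, ← hWGdef]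
            intro hany
            obtain ⟨v, hv, hb⟩ := List.any_eq_true.mp hany
            simp only [Bool.or_eq_true, beq_iff_eq] at hb
            rcases hb with hb | hb
            · exact hRnf v hv hb
            · exact hF v hv hb
          · have hs1 : ¬ s % 2 = 0 := by omega
            rw [if_neg hs1, if_neg hs1, pvRoundB_eq, hstale, ← hWGdef]
            intro hany
            obtain ⟨v, hv, hb⟩ := List.any_eq_true.mp hany
            simp only [Bool.or_eq_true, beq_iff_eq] at hb
            rcases hb with hb | hb
            · exact hF v hv hb
            · exact hRnf v hv hb
      · -- progress: recurse into the next level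
        push_neg at hfix
        obtain ⟨v0, hv0K, hv0⟩ := hfix
        have hcapWG : pvCap d.keys full WG + 1 ≤ pvCap d.keys full W := by
          refine pvCap_strict d.keys full W WG (fun v _ => pvSub_le (hWGlow v)) hv0K ?_ ?_
          · exact pvSub_lt (hWGlow v0) (Ne.symm hv0)
          · exact pvSub_le (hWGb v0)
        have hIH := ih (s + 1) WG R Ln' fA' hLn'K hWGb hRb hF hRnf
          (fun u hu hnu v hv => by
            have : WG u = W u := by
              by_contra hne
              exact hnu (hchg u hne)
            rw [this]
            exact hstl u hu v hv)
          (fun u hu v hv => by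
            rw [hWGdef]
            exact pvStep1_edge d d.keys R W hu hv)
          (by omega) (by omega)
        rw [pvMk_flip] at hIH
        rw [show (((s + 1 : Nat) : Int)) = (s : Int) + 1 by push_cast; ring] at hIH
        rw [hres, hIH]
        rcases Nat.eq_zero_or_pos (s % 2) with hs | hs
        · have hs1 : ¬ (s + 1) % 2 = 0 := by omega
          simp only [if_pos hs, if_neg hs1]
          rw [pvLoopB_succ, pvRoundB_eq, hstale, ← hWGdef, if_neg, if_neg]
          · intro hall
            have := List.all_eq_true.mp hall v0 hv0K
            simp only [Bool.and_eq_true, beq_iff_eq] at this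
            exact hv0 this.2
          · intro hany
            obtain ⟨v, hv, hb⟩ := List.any_eq_true.mp hany
            simp only [Bool.or_eq_true, beq_iff_eq] at hb
            rcases hb with hb | hb
            · exact hRnf v hv hb
            · exact hF v hv hb
        · have hs1 : ¬ s % 2 = 0 := by omega
          have hs0 : (s + 1) % 2 = 0 := by omega
          simp only [if_neg hs1, if_pos hs0]
          rw [pvLoopB_succ, pvRoundB_eq, hstale, ← hWGdef, if_neg, if_neg]
          · intro hall
            have := List.all_eq_true.mp hall v0 hv0K
            simp only [Bool.and_eq_true, beq_iff_eq] at this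
            exact hv0 this.1
          · intro hany
            obtain ⟨v, hv, hb⟩ := List.any_eq_true.mp hany
            simp only [Bool.or_eq_true, beq_iff_eq] at hb
            rcases hb with hb | hb
            · exact hF v hv hb
            · exact hRnf v hv hb

lemma pvInit (l : List Int) (hN : l.Nodup) :
    ∀ (E : Int → Nat) (p : Nat) (S : List Int),
    (∀ c ∈ l, E c = 0) →
    ((l.foldl (fun (st : (Int → Nat × Nat) × List (Int × Int) × Nat) c =>
        (fun w => if w = c then (st.2.2, (st.1 w).2) else st.1 w,
         pvPush st.2.1 ((0 : Int), c), st.2.2 <<< 1))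
        (fun v => (E v, 0), pvBlock 0 S, p)).1
      = (fun v => ((l.foldl (fun (st : (Int → Nat) × Nat) c =>
          (fun w => if w = c then st.1 w ||| st.2 else st.1 w, st.2 <<< 1)) (E, p)).1 v, 0)))
    ∧ (l.foldl (fun (st : (Int → Nat × Nat) × List (Int × Int) × Nat) c =>
        (fun w => if w = c then (st.2.2, (st.1 w).2) else st.1 w,
         pvPush st.2.1 ((0 : Int), c), st.2.2 <<< 1))
        (fun v => (E v, 0), pvBlock 0 S, p)).2.2 = p <<< l.length
    ∧ (∃ S', (l.foldl (fun (st : (Int → Nat × Nat) × List (Int × Int) × Nat) c =>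
        (fun w => if w = c then (st.2.2, (st.1 w).2) else st.1 w,
         pvPush st.2.1 ((0 : Int), c), st.2.2 <<< 1))
        (fun v => (E v, 0), pvBlock 0 S, p)).2.1 = pvBlock 0 S' ∧ S'.Perm (S ++ l))
    ∧ (∀ v, v ∉ l → (l.foldl (fun (st : (Int → Nat) × Nat) c =>
          (fun w => if w = c then st.1 w ||| st.2 else st.1 w, st.2 <<< 1)) (E, p)).1 v = E v)
    ∧ (∀ v ∈ l, ∃ i < l.length, (l.foldl (fun (st : (Int → Nat) × Nat) c =>
          (fun w => if w = c then st.1 w ||| st.2 else st.1 w, st.2 <<< 1)) (E, p)).1 v = p <<< i) := by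
  induction l with
  | nil =>
    intro E p S hE0
    refine ⟨rfl, rfl, ⟨S, by simp, by simp⟩, fun v _ => rfl, by simp⟩
  | cons c l' ih =>
    intro E p S hE0
    have hc : c ∉ l' := (List.nodup_cons.mp hN).1
    have hN' : l'.Nodup := (List.nodup_cons.mp hN).2
    -- one A-step
    obtain ⟨S'', hS'', hSp⟩ := pvPush_block 0 S c
    have hr : (fun w => if w = c then (p, ((fun v => (E v, (0:Nat))) w).2) else (E w, 0))
        = (fun v => ((fun w => if w = c then E w ||| p else E w) v, (0:Nat))) := by
      funext w
      by_cases hw : w = c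
      · simp [hw, hE0 c (by simp)]
      · simp [hw]
    have hE0' : ∀ x ∈ l', (fun w => if w = c then E w ||| p else E w) x = 0 := by
      intro x hx
      have : x ≠ c := fun h => hc (h ▸ hx)
      simp [this, hE0 x (by simp [hx])]
    obtain ⟨ihA, ihP, ⟨S3, hS3, hS3p⟩, ihOff, ihChar⟩ :=
      ih hN' (fun w => if w = c then E w ||| p else E w) (p <<< 1) S'' hE0'
    rw [List.foldl_cons, List.foldl_cons]
    simp only [hS'']
    rw [show (fun w => if w = c then (p, ((fun v => (E v, (0:Nat))) w).2) else (fun v => (E v, (0:Nat))) w)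
        = (fun v => ((fun w => if w = c then E w ||| p else E w) v, (0:Nat))) from hr]
    refine ⟨ihA, ?_, ⟨S3, hS3, ?_⟩, ?_, ?_⟩
    · rw [ihP, ← Nat.shiftLeft_add]
      congr 1
      simp [Nat.add_comm]
    · refine hS3p.trans ?_
      have h1 : (S'' ++ l').Perm ((c :: S) ++ l') := hSp.append_right l'
      have h2 : ((c :: S) ++ l') = c :: (S ++ l') := by simp
      exact (h2 ▸ h1).trans List.perm_middle.symm
    · intro v hv
      rw [ihOff v (fun h => hv (by simp [h]))]
      have : v ≠ c := fun h => hv (by simp [h])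
      simp [this]
    · intro v hv
      rcases List.mem_cons.mp hv with hv | hv
      · subst hv
        refine ⟨0, by simp, ?_⟩
        rw [ihOff v hc]
        simp [hE0 v (by simp)]
      · obtain ⟨i, hi, hval⟩ := ihChar v hv
        refine ⟨i + 1, by simp; omega, ?_⟩
        rw [hval, ← Nat.shiftLeft_add]
        congr 1
        omega

-- ---- dict facts ----
lemma pvKeys_ofList (g : List (Int × List Int)) :
    (PySem.Dict.ofList g).keys = PySem.Set.ofList (g.map Prod.fst) := by
  show (PySem.Dict.empty.update g).keys = _
  unfold PySem.Dict.update
  rw [PySem.Dict.keys_foldl_insert_key (key := Prod.fst) (f := fun _ p => p.2)]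
  rw [PySem.Dict.keys_empty]
  rfl

lemma pvGetD_mem (g : List (Int × List Int)) (u : Int) :
    (PySem.Dict.ofList g).getD u [] = [] ∨ (u, (PySem.Dict.ofList g).getD u []) ∈ g := by
  rw [PySem.Dict.getD_eq_get?_getD]
  have : ∀ (d : PySem.Dict Int (List Int)) (ps : List (Int × List Int)),
      (d.update ps).get? u = d.get? u ∨ (∃ ns, (d.update ps).get? u = some ns ∧ (u, ns) ∈ ps) := by
    intro d ps
    induction ps generalizing d with
    | nil => exact Or.inl rfl
    | cons q qs ih =>
      show (PySem.Dict.update (d.insert q.1 q.2) qs).get? u = _ ∨ _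
      rcases ih (d.insert q.1 q.2) with h | ⟨ns, h1, h2⟩
      · rw [PySem.Dict.get?_insert] at h
        by_cases hq : u = q.1
        · rw [if_pos hq] at h
          exact Or.inr ⟨q.2, h, by rw [hq]; simp⟩
        · rw [if_neg hq] at h
          exact Or.inl h
      · exact Or.inr ⟨ns, h1, by simp [h2]⟩
  rcases this PySem.Dict.empty g with h | ⟨ns, h1, h2⟩
  · left; rw [show (PySem.Dict.ofList g).get? u = PySem.Dict.empty.get? u from h]; simp [PySem.Dict.get?_empty]
  · right
    rw [show (PySem.Dict.ofList g).get? u = some ns from h1]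
    simpa using h2

-- ===== VERDICT (by name: the statement is the Claim_ definition above) =====
theorem converge_v2_spec : Claim_equal_converge_v2 := by
  unfold Claim_equal_converge_v2
  intro g coins _hDom hPre
  unfold Spec_converge_v2 converge_v2 converge_v2_alt
  by_cases hle : (PySem.Set.ofList coins).length ≤ 1
  · simp only [if_pos hle]
  · simp only [if_neg hle]
    set cs := PySem.Set.ofList coins with hcs
    set d := PySem.Dict.ofList g with hd
    have hk : 2 ≤ cs.length := by omega
    obtain ⟨hcoins, hedges⟩ := hPre hk
    have hkeys : ∀ x, x ∈ d.keys ↔ x ∈ g.map Prod.fst := by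
      rw [hd, pvKeys_ofList]
      intro x
      exact PySem.Set.mem_ofList _ x
    have hadj : ∀ u, ∀ v ∈ d.getD u [], v ∈ d.keys := by
      intro u v hv
      rcases pvGetD_mem g u with h | h
      · rw [← hd] at h; rw [h] at hv; cases hv
      · exact (hkeys v).mpr (hedges _ h v hv)
    have hN : cs.Nodup := PySem.Set.nodup_ofList coins
    obtain ⟨hA1, hA2, ⟨S0, hS0, hS0p⟩, hOff, hChar⟩ := pvInit cs hN (fun _ => 0) 1 [] (fun _ _ => rfl)
    set E0 : Int → Nat := (cs.foldl (fun (st : (Int → Nat) × Nat) c =>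
        (fun w => if w = c then st.1 w ||| st.2 else st.1 w, st.2 <<< 1)) (fun _ => 0, 1)).1 with hE0
    have hA1' : (cs.foldl (fun (st : (Int → Nat × Nat) × List (Int × Int) × Nat) c =>
        (fun w => if w = c then (st.2.2, (st.1 w).2) else st.1 w,
         pvPush st.2.1 ((0 : Int), c), st.2.2 <<< 1)) (fun _ => (0, 0), [], 1)).1
        = fun v => (E0 v, 0) := hA1
    have hA2' : (cs.foldl (fun (st : (Int → Nat × Nat) × List (Int × Int) × Nat) c =>
        (fun w => if w = c then (st.2.2, (st.1 w).2) else st.1 w,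
         pvPush st.2.1 ((0 : Int), c), st.2.2 <<< 1)) (fun _ => (0, 0), [], 1)).2.2
        = 1 <<< cs.length := hA2
    have hS0' : (cs.foldl (fun (st : (Int → Nat × Nat) × List (Int × Int) × Nat) c =>
        (fun w => if w = c then (st.2.2, (st.1 w).2) else st.1 w,
         pvPush st.2.1 ((0 : Int), c), st.2.2 <<< 1)) (fun _ => (0, 0), [], 1)).2.1
        = pvBlock 0 S0 := hS0
    rw [hA1', hA2', hS0']
    set full : Nat := 1 <<< cs.length - 1 with hfull
    have hfull2 : full = 2 ^ cs.length - 1 := by rw [hfull, Nat.shiftLeft_eq, one_mul]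
    have hS0cs : ∀ v, v ∈ S0 ↔ v ∈ cs := by
      intro v
      rw [hS0p.mem_iff]
      simp
    have hS0len : S0.length = cs.length := by rw [hS0p.length_eq]; simp
    have hRb : ∀ v, pvSub (E0 v) full := by
      intro v
      by_cases hv : v ∈ cs
      · obtain ⟨i, hi, hval⟩ := hChar v hv
        rw [hval, hfull2, Nat.shiftLeft_eq, one_mul]
        exact pvBit_sub_full hi
      · rw [hOff v hv]
        exact pvSub_zero _
    have hRnf : ∀ v ∈ d.keys, E0 v ≠ full := by
      intro v _
      by_cases hv : v ∈ cs
      · obtain ⟨i, hi, hval⟩ := hChar v hv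
        rw [hval, hfull2, Nat.shiftLeft_eq, one_mul]
        exact pvBit_ne_full hk
      · rw [hOff v hv, hfull2]
        exact pvZero_ne_full hk
    have hmk : (fun v => (E0 v, (0 : Nat))) = pvMk (pvPar 0) E0 (fun _ => 0) := by
      funext v
      simp [pvMk, pvPar]
    rw [hmk, show ((0 : Int)) = (((0 : Nat) : Int)) from rfl]
    have hlev := pvLevel d full hadj (4 * d.keys.length * full + 2) 0 E0 (fun _ => 0) S0
      (cs.length + 4 * d.keys.length * full + 1)
      (fun v hv => (hkeys v).mpr (hcoins v ((PySem.Set.mem_ofList coins v).mp ((hS0cs v).mp hv))))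
      hRb
      (fun v => pvSub_zero full)
      hRnf
      (fun v _ => by rw [hfull2]; exact (pvZero_ne_full hk))
      (fun u hu hnu v hv => by
        have hucs : u ∉ cs := fun hc => hnu ((hS0cs u).mpr hc)
        rw [hOff u hucs]
        exact pvSub_zero _)
      (fun u hu v hv => pvSub_zero (E0 v))
      (by
        have h1 := pvCap_le d.keys full E0
        have h2 := pvCap_le d.keys full (fun _ => 0)
        have h3 : 4 * d.keys.length * full = 4 * (d.keys.length * full) := by ring
        rw [hS0len]
        omega)
      (by
        have h1 := pvCap_le d.keys full E0
        have h2 := pvCap_le d.keys full (fun _ => 0)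
        have h3 : 4 * d.keys.length * full = 4 * (d.keys.length * full) := by ring
        omega)
    rw [hlev]
    norm_num
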